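-- pv_equiv track=rewrite | github.com/Ganon11/AdventCode | 2021/Day3/src/Day3.py | get_gamma_rate
-- ===== SOURCE A (Python) =====
-- from collections import defaultdict
--
-- def get_bitcounts(diagnostics):
--   bitlen = len(diagnostics[0])
--   bitcounts = defaultdict(int)
--   for diagnostic in diagnostics:
--     for index in range(bitlen):
--       if diagnostic[index] == '1':
--         bitcounts[index] += 1
--   return bitcounts
--
-- def get_gamma_rate(diagnostics):
--   bitlen = len(diagnostics[0])
--   bitcounts = get_bitcounts(diagnostics)
--
--   bits = ['0' for x in range(bitlen)]
--   count = len(diagnostics)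
--   for index in range(bitlen):
--     if bitcounts[index] >= (count / 2):
--       bits[index] = '1'
--   return int(''.join(bits), 2)
-- ===== SOURCE B (Python) =====
-- def get_gamma_rate(diagnostics):
--   bitlen = len(diagnostics[0])
--   count = len(diagnostics)
--   value = 0
--   for index in range(bitlen):
--     ones = sum(1 for d in diagnostics if d[index] == '1')
--     value = value * 2 + (1 if 2 * ones >= count else 0)
--   return value
-- ===== Notes on version B (the rewrite author's own statement) =====
-- stated objective: simpler
-- what changed: Single column-outer pass that counts ones per column and accumulates the gamma value arithmetically (value = value*2 + bit), replacing A's two row-outer passes, the defaultdict count table, the helper function and the build-a-bit-string-then-int(s,2) step.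
import Mathlib
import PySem

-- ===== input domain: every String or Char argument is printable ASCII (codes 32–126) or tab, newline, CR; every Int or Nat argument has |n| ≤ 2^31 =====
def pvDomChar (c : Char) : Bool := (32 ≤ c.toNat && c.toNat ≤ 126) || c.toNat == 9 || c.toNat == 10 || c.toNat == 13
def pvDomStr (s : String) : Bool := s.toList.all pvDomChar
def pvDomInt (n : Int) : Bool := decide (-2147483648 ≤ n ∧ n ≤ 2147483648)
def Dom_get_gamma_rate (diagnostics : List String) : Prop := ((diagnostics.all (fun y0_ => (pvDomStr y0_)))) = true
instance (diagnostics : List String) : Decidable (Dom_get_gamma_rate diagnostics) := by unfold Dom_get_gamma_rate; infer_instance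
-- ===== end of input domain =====

-- B replaces A's two row-outer passes, defaultdict table, helper and int(''.join(bits), 2) step
-- with one column-outer pass that accumulates the gamma value arithmetically (objective: simpler).


-- ===== PORT A =====
-- int(s, 2), ported by hand as a left digit fold: exact on the strings A passes to it here,
-- which are nonempty and consist only of '0'/'1' (no sign, space, prefix or underscore).
def pvBinVal (cs : List Char) : Int :=
  cs.foldl (fun v c => v * 2 + (if c = '1' then 1 else 0)) 0

def get_bitcounts (diagnostics : List String) : PySem.Dict Int Int :=
  let bitlen : Int := ((PySem.List.pyGetD diagnostics 0 "").toList.length : Int)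
  diagnostics.foldl
    (fun bitcounts diagnostic =>
      (PySem.List.pyRange 0 bitlen).foldl
        (fun bitcounts index =>
          if PySem.Str.pyGet? diagnostic index = some '1' then
            -- defaultdict(int): bitcounts[index] += 1 reads default 0 and overwrites in place
            bitcounts.insert index (bitcounts.getD index 0 + 1)
          else bitcounts)
        bitcounts)
    PySem.Dict.empty

def get_gamma_rate (diagnostics : List String) : Int :=
  let bitlen : Int := ((PySem.List.pyGetD diagnostics 0 "").toList.length : Int)
  let bitcounts := get_bitcounts diagnostics
  let bits0 : List Char := (PySem.List.pyRange 0 bitlen).map (fun _ => '0')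
  let count : Int := diagnostics.length
  -- 'bitcounts[index] >= count / 2' uses float division; ported as count ≤ 2*bitcounts[index],
  -- exact because count/2 is exactly representable for |count| ≤ 2^52.
  -- index.toNat is safe: indexes from pyRange 0 bitlen are nonnegative.
  let bits := (PySem.List.pyRange 0 bitlen).foldl
    (fun bits index =>
      if count ≤ 2 * bitcounts.getD index 0 then bits.set index.toNat '1' else bits)
    bits0
  pvBinVal bits

-- ===== PORT B =====
def get_gamma_rate_alt (diagnostics : List String) : Int :=
  let bitlen : Int := ((PySem.List.pyGetD diagnostics 0 "").toList.length : Int)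
  let count : Int := diagnostics.length
  (PySem.List.pyRange 0 bitlen).foldl
    (fun value index =>
      let ones : Int :=
        (diagnostics.map (fun d => if PySem.Str.pyGet? d index = some '1' then (1 : Int) else 0)).sum
      value * 2 + (if count ≤ 2 * ones then 1 else 0))
    0

-- ===== PRECONDITION & SPEC =====
-- Pre_ = exactly where Python A returns normally: a nonempty list (else IndexError on diagnostics[0]),
-- a nonempty first string (else int('', 2) raises ValueError), and every row at least bitlen long
-- (else diagnostic[index] raises IndexError).
def Pre_get_gamma_rate (diagnostics : List String) : Prop :=
  diagnostics ≠ [] ∧ 0 < (diagnostics.headI).toList.length ∧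
    ∀ d ∈ diagnostics, (diagnostics.headI).toList.length ≤ d.toList.length
instance (diagnostics : List String) : Decidable (Pre_get_gamma_rate diagnostics) := by
  unfold Pre_get_gamma_rate; infer_instance
def pvWitness_get_gamma_rate : List String := (["10", "11", "01"])

def Spec_get_gamma_rate (diagnostics : List String) (out : Int) : Prop := out = get_gamma_rate_alt diagnostics
instance (diagnostics : List String) (out : Int) : Decidable (Spec_get_gamma_rate diagnostics out) := by
  unfold Spec_get_gamma_rate; infer_instance

-- ===== CLAIM (what is proved, stated in full; the proofs are below) =====
def Claim_equal_get_gamma_rate : Prop := ∀ (diagnostics : List String), Dom_get_gamma_rate diagnostics → Pre_get_gamma_rate diagnostics → Spec_get_gamma_rate diagnostics (get_gamma_rate diagnostics)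
-- ===== LEMMAS AND PROOFS =====

-- number of ones that diagnostics carry at column i (B's per-column count)
def pvOnes (diagnostics : List String) (i : Int) : Int :=
  (diagnostics.map (fun d => if PySem.Str.pyGet? d i = some '1' then (1 : Int) else 0)).sum

lemma pvDict_inner (c : Int → Prop) [DecidablePred c] (R : List Int) (bc : PySem.Dict Int Int) (i : Int) :
    (R.foldl (fun bc index =>
        if c index then bc.insert index (bc.getD index 0 + 1) else bc) bc).getD i 0
      = bc.getD i 0 + (if c i then (R.count i : Int) else 0) := by
  induction R generalizing bc with
  | nil => simp
  | cons a R ih =>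
    simp only [List.foldl_cons, List.count_cons]
    rw [ih]
    by_cases hai : i = a
    · subst hai
      by_cases hc : c i <;> simp [hc, PySem.Dict.getD_insert] <;> push_cast <;> ring_nf
    · by_cases hca : c a <;> by_cases hc : c i <;>
        simp [hca, hc, PySem.Dict.getD_insert, hai, Ne.symm hai]

lemma pvDict_outer (ds : List String) (R : List Int) (bc : PySem.Dict Int Int) (i : Int) :
    (ds.foldl (fun bc d =>
        R.foldl (fun bc index =>
          if PySem.Str.pyGet? d index = some '1' then bc.insert index (bc.getD index 0 + 1)
          else bc) bc) bc).getD i 0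
      = bc.getD i 0 + (R.count i : Int) * pvOnes ds i := by
  induction ds generalizing bc with
  | nil => simp [pvOnes]
  | cons d ds ih =>
    simp only [List.foldl_cons]
    rw [ih, pvDict_inner (fun index => PySem.Str.pyGet? d index = some '1') R bc i]
    simp only [pvOnes, List.map_cons, List.sum_cons]
    by_cases hc : PySem.Str.pyGet? d i = some '1'
    · simp only [if_pos hc]; ring
    · simp only [if_neg hc]; ring

lemma pvEmpty_getD (i : Int) : (PySem.Dict.empty : PySem.Dict Int Int).getD i 0 = 0 := by
  simp [PySem.Dict.empty, PySem.Dict.getD, PySem.Dict.get?]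

lemma pvCount_pyRange (m : Nat) (j : Nat) (hj : j < m) :
    (PySem.List.pyRange 0 (m : Int)).count ((j : Nat) : Int) = 1 := by
  rw [PySem.List.pyRange_zero_natCast]
  rw [List.count_map_of_injective _ _ (fun a b h => by exact_mod_cast h)]
  exact List.count_eq_one_of_mem (List.nodup_range) (List.mem_range.mpr hj)

lemma pvBitcounts_getD (diagnostics : List String) (j : Nat)
    (hj : j < (PySem.List.pyGetD diagnostics 0 "").toList.length) :
    (get_bitcounts diagnostics).getD (j : Int) 0 = pvOnes diagnostics (j : Int) := by
  simp only [get_bitcounts]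
  rw [pvDict_outer, pvEmpty_getD, pvCount_pyRange _ j hj]
  simp

lemma pvSet_fold (p : Int → Prop) [DecidablePred p] (m : Nat) (l : List Char) :
    ((List.map (fun k : Nat => (k : Int)) (List.range m)).foldl
        (fun bits index => if p index then bits.set index.toNat '1' else bits) l)
      = l.mapIdx (fun j c => if j < m ∧ p (j : Int) then '1' else c) := by
  induction m with
  | zero => apply List.ext_getElem <;> simp
  | succ m ih =>
    rw [List.range_succ, List.map_append, List.foldl_append, ih]
    simp only [List.map_cons, List.map_nil, List.foldl_cons, List.foldl_nil, Int.toNat_natCast]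
    apply List.ext_getElem
    · by_cases hp : p (m : Int) <;> simp [hp]
    · intro n h1 h2
      by_cases hp : p (m : Int) <;>
        simp only [hp, if_true, if_false, List.getElem_set, List.getElem_mapIdx]
      · by_cases hmn : m = n
        · subst hmn; simp [hp]
        · simp only [if_neg hmn]
          by_cases hnm : n < m
          · by_cases hpn : p (n : Int) <;> simp [hnm, hpn, Nat.lt_succ_of_lt hnm]
          · have hn1 : ¬ n < m + 1 := by omega
            simp [hnm, hn1]
      · by_cases hnm : n < m
        · by_cases hpn : p (n : Int) <;> simp [hnm, hpn, Nat.lt_succ_of_lt hnm]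
        · by_cases hnm1 : n < m + 1
          · have hmn : n = m := by omega
            subst hmn; simp [hp]
          · simp [hnm, hnm1]

lemma pvPorts_eq (diagnostics : List String) :
    get_gamma_rate diagnostics = get_gamma_rate_alt diagnostics := by
  simp only [get_gamma_rate, get_gamma_rate_alt]
  rw [PySem.List.pyRange_zero_natCast]
  rw [pvSet_fold (fun index =>
        ((diagnostics.length : Int) ≤ 2 * (get_bitcounts diagnostics).getD index 0))]
  have hbits :
      (List.map (fun _ => '0')
          (List.map (fun k : Nat => (k : Int))
            (List.range (PySem.List.pyGetD diagnostics 0 "").toList.length))).mapIdx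
        (fun j c =>
          if j < (PySem.List.pyGetD diagnostics 0 "").toList.length ∧
              ((diagnostics.length : Int) ≤ 2 * (get_bitcounts diagnostics).getD (j : Int) 0)
          then '1' else c)
      = List.map
          (fun j : Nat =>
            if (diagnostics.length : Int) ≤ 2 * pvOnes diagnostics (j : Int) then '1' else '0')
          (List.range (PySem.List.pyGetD diagnostics 0 "").toList.length) := by
    apply List.ext_getElem
    · simp
    · intro n h1 h2
      have hn : n < (PySem.List.pyGetD diagnostics 0 "").toList.length := by simpa using h2
      simp only [List.getElem_mapIdx, List.getElem_map, List.getElem_range]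
      rw [pvBitcounts_getD diagnostics n hn]
      have hn2 : n < (PySem.List.pyGetD diagnostics 0 "").length := by simpa using hn
      simp [hn2]
  rw [hbits]
  simp only [pvBinVal, List.foldl_map, pvOnes]
  apply PySem.List.foldl_congr_mem
  intro acc x hx
  by_cases hc : (diagnostics.length : Int) ≤
      2 * (List.map (fun d => if PySem.Str.pyGet? d (x : Int) = some '1' then (1 : Int) else 0)
            diagnostics).sum <;>
    simp

-- ===== VERDICT (by name: the statement is the Claim_ definition above) =====
theorem get_gamma_rate_spec : Claim_equal_get_gamma_rate := by
  intro ds _ _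
  unfold Spec_get_gamma_rate
  exact pvPorts_eq ds
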